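-- pv_equiv track=rewrite | github.com/bbbarron/euler | 16euler.py | num_length
-- ===== SOURCE A (Python) =====
-- numbers_dict = {
--     n: len(word) for (n, word) in {
--         0: "",
--         1: "one",
--         2: "two",
--         3: "three",
--         4: "four",
--         5: "five",
--         6: "six",
--         7: "seven",
--         8: "eight",
--         9: "nine",
--         10: "ten",
--         11: "eleven",
--         12: "twelve",
--         13: "thirteen",
--         14: "fourteen",
--         15: "fifteen",
--         16: "sixteen",
--         17: "seventeen",
--         18: "eighteen",
--         19: "nineteen",
--         20: "twenty",
--         30: "thirty",
--         40: "forty",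
--         50: "fifty",
--         60: "sixty",
--         70: "seventy",
--         80: "eighty",
--         90: "ninety"
--     }.items()
-- }
--
-- def num_length(n):
--     if n <= 20:
--         return numbers_dict[n]
--     elif n < 100:
--         tens, rest = divmod(n, 10)
--         return numbers_dict[10 * tens] + num_length(rest)
--     elif n < 1000:
--         hundreds, rest = divmod(n, 100)
--         return num_length(hundreds) + len("hundred") + (
--             len("and") + num_length(rest) if rest else 0
--         )
--     else:
--         thousands, rest = divmod(n, 1000)
--         return num_length(thousands) + len("thousand") + num_length(rest)
-- ===== SOURCE B (Python) =====
-- # Iterative table-driven letter count: precomputed length tables for 0-20 and the tens,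
-- # a non-recursive 3-digit-group helper, and a loop over thousand-groups instead of recursion.
-- _SMALL = [0, 3, 3, 5, 4, 4, 3, 5, 5, 4, 3, 6, 6, 8, 8, 7, 7, 9, 8, 8, 6]
-- _TENS = [0, 0, 6, 6, 5, 5, 5, 7, 6, 6]
--
--
-- def _len2(r):
--     if r <= 20:
--         return _SMALL[r]
--     return _TENS[r // 10] + _SMALL[r % 10]
--
--
-- def _len3(g):
--     h, r = divmod(g, 100)
--     if h == 0:
--         return _len2(r)
--     return _SMALL[h] + 7 + (3 + _len2(r) if r else 0)  # 7 = len("hundred"), 3 = len("and")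
--
--
-- def num_length(n):
--     total = _len3(n % 1000)
--     n //= 1000
--     while n > 0:
--         total += 8 + _len3(n % 1000)  # 8 = len("thousand")
--         n //= 1000
--     return total
-- ===== Notes on version B (the rewrite author's own statement) =====
-- stated objective: alternative
-- what changed: Replaces the self-recursive dict-summing function by an iterative version: precomputed length tables for 0-20 and the tens, a non-recursive three-digit-group helper, and a while loop that folds over thousand-groups with an accumulator instead of recursing.
-- outside the precondition, e.g. on num_length(-1): A raises KeyError, B returns 24
import Mathlib
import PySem

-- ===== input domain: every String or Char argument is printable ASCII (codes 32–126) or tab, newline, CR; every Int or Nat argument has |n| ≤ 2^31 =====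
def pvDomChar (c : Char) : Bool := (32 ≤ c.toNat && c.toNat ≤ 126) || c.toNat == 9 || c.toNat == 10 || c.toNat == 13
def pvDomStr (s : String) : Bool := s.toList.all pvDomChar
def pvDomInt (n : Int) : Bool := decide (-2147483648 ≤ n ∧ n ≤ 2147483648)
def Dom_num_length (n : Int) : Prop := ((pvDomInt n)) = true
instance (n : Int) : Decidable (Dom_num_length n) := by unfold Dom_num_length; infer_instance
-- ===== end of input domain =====

-- B replaces A's self-recursive dict-summing by precomputed length tables, a flat
-- three-digit-group helper and an accumulator loop over thousand-groups (alternative, same cost).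


-- ===== PORT A =====
-- numbers_dict = {n: len(word) for ...}
def numbersDict : PySem.Dict Int Int := PySem.Dict.ofList
  [(0, 0), (1, 3), (2, 3), (3, 5), (4, 4), (5, 4), (6, 3), (7, 5), (8, 5), (9, 4),
   (10, 3), (11, 6), (12, 6), (13, 8), (14, 8), (15, 7), (16, 7), (17, 9), (18, 8), (19, 8),
   (20, 6), (30, 6), (40, 5), (50, 5), (60, 5), (70, 7), (80, 6), (90, 6)]

-- numbers_dict[k]; a missing key is a KeyError (Pre_ excludes n < 0, the only way to reach one);
-- .getD 0 is never taken on admitted inputs.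
def numbersDictGet (k : Int) : Int := (PySem.Dict.get? numbersDict k).getD 0

def num_length (n : Int) : Int :=
  if n ≤ 20 then numbersDictGet n
  else if n < 100 then
    let tens := PySem.Int.floordiv n 10
    let rest := PySem.Int.mod n 10
    numbersDictGet (10 * tens) + num_length rest
  else if n < 1000 then
    let hundreds := PySem.Int.floordiv n 100
    let rest := PySem.Int.mod n 100
    num_length hundreds + 7 + (if rest ≠ 0 then 3 + num_length rest else 0)
  else
    let thousands := PySem.Int.floordiv n 1000
    let rest := PySem.Int.mod n 1000
    num_length thousands + 8 + num_length rest
termination_by n.toNat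
decreasing_by
  · have h1 := PySem.Int.mod_nonneg n (b := 10) (by omega)
    have h2 := PySem.Int.mod_lt n (b := 10) (by omega)
    omega
  · have := PySem.Int.floordiv_eq_ediv_of_pos (a := n) (b := 100) (by omega)
    omega
  · have h1 := PySem.Int.mod_nonneg n (b := 100) (by omega)
    have h2 := PySem.Int.mod_lt n (b := 100) (by omega)
    omega
  · have := PySem.Int.floordiv_eq_ediv_of_pos (a := n) (b := 1000) (by omega)
    omega
  · have h1 := PySem.Int.mod_nonneg n (b := 1000) (by omega)
    have h2 := PySem.Int.mod_lt n (b := 1000) (by omega)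
    omega

-- ===== PORT B =====
def smallLens : List Int := [0, 3, 3, 5, 4, 4, 3, 5, 5, 4, 3, 6, 6, 8, 8, 7, 7, 9, 8, 8, 6]
def tensLens : List Int := [0, 0, 6, 6, 5, 5, 5, 7, 6, 6]

def len2 (r : Int) : Int :=
  if r ≤ 20 then (PySem.List.pyGet? smallLens r).getD 0
  else (PySem.List.pyGet? tensLens (PySem.Int.floordiv r 10)).getD 0 +
       (PySem.List.pyGet? smallLens (PySem.Int.mod r 10)).getD 0

def len3 (g : Int) : Int :=
  let h := PySem.Int.floordiv g 100
  let r := PySem.Int.mod g 100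
  if h = 0 then len2 r
  else (PySem.List.pyGet? smallLens h).getD 0 + 7 + (if r ≠ 0 then 3 + len2 r else 0)

def altLoop (n total : Int) : Int :=
  if 0 < n then
    altLoop (PySem.Int.floordiv n 1000) (total + 8 + len3 (PySem.Int.mod n 1000))
  else total
termination_by n.toNat
decreasing_by
  have := PySem.Int.floordiv_eq_ediv_of_pos (a := n) (b := 1000) (by omega)
  omega

def num_length_alt (n : Int) : Int :=
  altLoop (PySem.Int.floordiv n 1000) (len3 (PySem.Int.mod n 1000))

-- ===== PRECONDITION & SPEC =====
-- Pre_ excludes n < 0, on which A raises KeyError (numbers_dict has no negative keys).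
def Pre_num_length (n : Int) : Prop := 0 ≤ n
instance (n : Int) : Decidable (Pre_num_length n) := by unfold Pre_num_length; infer_instance
def pvWitness_num_length : Int := (342)

def Spec_num_length (n : Int) (out : Int) : Prop := out = num_length_alt n
instance (n : Int) (out : Int) : Decidable (Spec_num_length n out) := by unfold Spec_num_length; infer_instance

-- ===== CLAIM (what is proved, stated in full; the proofs are below) =====
def Claim_equal_num_length : Prop := ∀ (n : Int), Dom_num_length n → Pre_num_length n → Spec_num_length n (num_length n)

-- ===== LEMMAS AND PROOFS =====

-- small table agreement, decided once on Nat literals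
theorem dict_small (m : Nat) (h : m < 21) :
    (PySem.Dict.get? numbersDict (m : Int)).getD 0 = (PySem.List.pyGet? smallLens (m : Int)).getD 0 := by
  revert m h; decide

theorem dict_tens (t : Nat) (h1 : 2 ≤ t) (h2 : t < 10) :
    (PySem.Dict.get? numbersDict (10 * (t : Int))).getD 0 = (PySem.List.pyGet? tensLens (t : Int)).getD 0 := by
  revert t h1 h2; decide

theorem num_length_le20 (n : Int) (h0 : 0 ≤ n) (h : n ≤ 20) :
    num_length n = (PySem.List.pyGet? smallLens n).getD 0 := by
  rw [num_length, if_pos h]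
  show (PySem.Dict.get? numbersDict n).getD 0 = _
  have hm : n = ((n.toNat : Nat) : Int) := by omega
  rw [hm]
  exact dict_small n.toNat (by omega)

theorem num_length_lt100 (n : Int) (h0 : 0 ≤ n) (h : n < 100) :
    num_length n = len2 n := by
  by_cases h20 : n ≤ 20
  · rw [num_length_le20 n h0 h20, len2, if_pos h20]
  · have hdiv := PySem.Int.floordiv_eq_ediv_of_pos (a := n) (b := 10) (by omega)
    have hmn := PySem.Int.mod_nonneg n (b := 10) (by omega)
    have hml := PySem.Int.mod_lt n (b := 10) (by omega)
    rw [num_length, if_neg h20, if_pos h, len2, if_neg h20]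
    show (PySem.Dict.get? numbersDict (10 * PySem.Int.floordiv n 10)).getD 0
        + num_length (PySem.Int.mod n 10) = _
    rw [num_length_le20 _ hmn (by omega)]
    have ht : PySem.Int.floordiv n 10 = (((PySem.Int.floordiv n 10).toNat : Nat) : Int) := by omega
    rw [ht, dict_tens (PySem.Int.floordiv n 10).toNat (by omega) (by omega)]

theorem num_length_lt1000 (n : Int) (h0 : 0 ≤ n) (h : n < 1000) :
    num_length n = len3 n := by
  have hdiv := PySem.Int.floordiv_eq_ediv_of_pos (a := n) (b := 100) (by omega)
  have hmn := PySem.Int.mod_nonneg n (b := 100) (by omega)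
  have hml := PySem.Int.mod_lt n (b := 100) (by omega)
  by_cases h100 : n < 100
  · have hz : PySem.Int.floordiv n 100 = 0 := by omega
    have hr : PySem.Int.mod n 100 = n := by
      have := PySem.Int.floordiv_mul_add_mod n 100; omega
    rw [num_length_lt100 n h0 h100, len3]
    show _ = if PySem.Int.floordiv n 100 = 0 then len2 (PySem.Int.mod n 100)
        else (PySem.List.pyGet? smallLens (PySem.Int.floordiv n 100)).getD 0 + 7
          + (if PySem.Int.mod n 100 ≠ 0 then 3 + len2 (PySem.Int.mod n 100) else 0)
    rw [if_pos hz, hr]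
  · rw [num_length, if_neg (by omega), if_neg h100, if_pos h, len3]
    show num_length (PySem.Int.floordiv n 100) + 7
        + (if PySem.Int.mod n 100 ≠ 0 then 3 + num_length (PySem.Int.mod n 100) else 0)
      = if PySem.Int.floordiv n 100 = 0 then len2 (PySem.Int.mod n 100)
        else (PySem.List.pyGet? smallLens (PySem.Int.floordiv n 100)).getD 0 + 7
          + (if PySem.Int.mod n 100 ≠ 0 then 3 + len2 (PySem.Int.mod n 100) else 0)
    rw [if_neg (show ¬ PySem.Int.floordiv n 100 = 0 by omega)]
    rw [num_length_le20 _ (by omega) (by omega)]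
    by_cases hr : PySem.Int.mod n 100 = 0
    · rw [if_neg (by omega), if_neg (by omega)]
    · rw [if_pos hr, if_pos hr, num_length_lt100 _ hmn (by omega)]

theorem num_length_big (q : Int) (h : 1000 ≤ q) :
    num_length q = num_length (PySem.Int.floordiv q 1000) + 8 + num_length (PySem.Int.mod q 1000) := by
  rw [num_length, if_neg (by omega), if_neg (by omega), if_neg (by omega)]

theorem altLoop_pos (k : Nat) : ∀ q t : Int, q.toNat ≤ k → 0 < q → altLoop q t = t + 8 + num_length q := by
  induction k with
  | zero => intro q t hle hq; omega
  | succ k ih =>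
    intro q t hle hq
    have hdiv := PySem.Int.floordiv_eq_ediv_of_pos (a := q) (b := 1000) (by omega)
    have hmn := PySem.Int.mod_nonneg q (b := 1000) (by omega)
    have hml := PySem.Int.mod_lt q (b := 1000) (by omega)
    rw [altLoop, if_pos hq]
    by_cases hsm : q < 1000
    · have hz : PySem.Int.floordiv q 1000 = 0 := by omega
      have hr : PySem.Int.mod q 1000 = q := by
        have := PySem.Int.floordiv_mul_add_mod q 1000; omega
      rw [hz, hr, altLoop, if_neg (by omega), num_length_lt1000 q (by omega) hsm]
    · rw [ih (PySem.Int.floordiv q 1000) (t + 8 + len3 (PySem.Int.mod q 1000)) (by omega) (by omega),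
          num_length_big q (by omega), num_length_lt1000 _ hmn (by omega)]
      ring

theorem num_length_spec_aux (n : Int) (h0 : 0 ≤ n) : num_length n = num_length_alt n := by
  have hdiv := PySem.Int.floordiv_eq_ediv_of_pos (a := n) (b := 1000) (by omega)
  have hmn := PySem.Int.mod_nonneg n (b := 1000) (by omega)
  have hml := PySem.Int.mod_lt n (b := 1000) (by omega)
  rw [num_length_alt]
  by_cases h : n < 1000
  · have hz : PySem.Int.floordiv n 1000 = 0 := by omega
    have hr : PySem.Int.mod n 1000 = n := by
      have := PySem.Int.floordiv_mul_add_mod n 1000; omega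
    rw [hz, hr, altLoop, if_neg (by omega), num_length_lt1000 n h0 h]
  · rw [altLoop_pos ((PySem.Int.floordiv n 1000).toNat) _ _ (le_refl _) (by omega),
        num_length_big n (by omega), num_length_lt1000 _ hmn (by omega)]
    ring

-- ===== VERDICT (by name: the statement is the Claim_ definition above) =====
theorem num_length_spec : Claim_equal_num_length := by
  intro n _ hpre
  exact num_length_spec_aux n hpre
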